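-- pv_equiv track=rewrite | github.com/mainroach/compression | css-binary-fmt/fibcodes.py | genFib3Codes
-- ===== SOURCE A (Python) =====
-- def F3(n):
--     if n <= 0: return 0
--     elif n == 1: return 1
--     else: return F3(n-1)+F3(n-2)+F3(n-3)
--
-- def genFib3Codes(numCodes):
--     '''
--     Generate FIB3 codes based on http://comjnl.oxfordjournals.org/content/53/6/701.short
--     '''
--
--     codes=[]
--     codes.append([0x07,3]) #stack the first one
--
--     symbolCount =1
--
--     # A fib M code consists of a prefix, and suffix
--     # The suffix is full of '1's, length equal to M, where M is 2, 3, 4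
--     # The prefix is 'groupIndex' bits long, where groupIndex increases from 1,X
--     # The prefix data is composed of [0,Q], where Q = Fib3(groupIndex) (if M == 3)
--     #   and then those bits are reversed
--     groupIdx = 0
--     while symbolCount < numCodes:
--
--         groupCt = F3(groupIdx) #figure out how many numbers are in this fib group
--
--         bitSize= groupIdx #bit size is always equal to whatever our fib index is
--         for n in range(groupCt):
--             #http://stackoverflow.com/questions/12681945/reversing-bits-of-python-integer
--             b = '{:0{width}b}'.format(n, width=bitSize)
--             code =  (int(b[::-1], 2)<<3) | 0x07 # note, for these fib codes we shift 3 bits into the lower position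
--             #print bin(code)
--
--             codes.append([code,bitSize+3])
--
--             symbolCount +=1
--             if symbolCount >= numCodes: break
--
--         if symbolCount >= numCodes: break
--         groupIdx +=1
--
--     return codes
-- ===== SOURCE B (Python) =====
-- def genFib3Codes(numCodes):
--     # Iterative rolling Fibonacci-3 triple instead of the recursive F3 helper,
--     # arithmetic bit reversal instead of string format/reverse/parse, and the
--     # break logic replaced by taking min(groupCt, remaining) codes per group.
--     codes = [[0x07, 3]]
--     x, y, z = 1, 0, 0   # rolling triple: z is F3(g) for the current group g
--     g = 0               # group index = prefix bit size
--     while len(codes) < numCodes: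
--         take = min(z, numCodes - len(codes))
--         for n in range(take):
--             rev = 0
--             m = n
--             for _ in range(g):
--                 rev = (rev << 1) | (m & 1)
--                 m >>= 1
--             codes.append([(rev << 3) | 0x07, g + 3])
--         x, y, z = y, z, x + y + z
--         g += 1
--     return codes
-- ===== Notes on version B (the rewrite author's own statement) =====
-- stated objective: alternative
-- what changed: Replaces the naive recursive F3 helper with a rolling three-value iteration advanced once per group, replaces the format/reverse-string/parse bit-reversal trick with an arithmetic shift-and-mask loop, and replaces the two symbolCount break checks with taking min(groupCt, remaining) codes per group.
import Mathlib
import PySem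

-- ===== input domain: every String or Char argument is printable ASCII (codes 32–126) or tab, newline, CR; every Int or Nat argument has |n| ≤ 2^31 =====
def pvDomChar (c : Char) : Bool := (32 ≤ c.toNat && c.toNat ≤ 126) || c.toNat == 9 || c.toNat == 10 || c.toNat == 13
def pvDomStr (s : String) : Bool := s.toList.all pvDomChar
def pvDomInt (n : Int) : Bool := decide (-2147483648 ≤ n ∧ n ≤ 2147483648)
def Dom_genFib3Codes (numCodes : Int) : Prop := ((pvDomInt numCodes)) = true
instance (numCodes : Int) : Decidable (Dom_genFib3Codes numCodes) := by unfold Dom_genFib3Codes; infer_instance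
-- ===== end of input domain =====

-- B replaces A's recursive F3 helper by a rolling triple, the
-- format/reverse/parse string trick by an arithmetic bit-reversal loop, and the
-- two break checks by taking min(groupCt, remaining) codes per group (objective: alternative/simpler).

-- ===== PORT A =====

-- port of A's recursive helper F3
def F3 (n : Int) : Int :=
  if n ≤ 0 then 0
  else if n = 1 then 1
  else F3 (n-1) + F3 (n-2) + F3 (n-3)
termination_by n.toNat
decreasing_by all_goals omega

-- binary digits of n, MSB first, [] for 0 (the digit string bin(n) writes, sans the special-case "0")
def binRec (n : Nat) : List Char :=
  if n = 0 then [] else binRec (n / 2) ++ [if n % 2 = 1 then '1' else '0']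
termination_by n
decreasing_by omega

-- '{:b}'.format(n) for n ≥ 0
def binStr (n : Nat) : List Char := if n = 0 then ['0'] else binRec n

-- '{:0{width}b}'.format(n, width=w) for n ≥ 0 : zero-pad on the left to width w
def fmtBin (w : Nat) (n : Nat) : List Char :=
  List.replicate (w - (binStr n).length) '0' ++ binStr n

-- int(b, 2) for a string of binary digits
def parseBin (l : List Char) : Int :=
  l.foldl (fun a c => 2 * a + (if c = '1' then 1 else 0)) 0

-- the inner `for n in range(groupCt)` loop with its break;
-- n ≥ 0 (it comes from range) so `(x << 3) | 0x07` is 8*x+7 and format sees a nonnegative int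
def innerA (numCodes bitSize : Int) (sc : Int) (codes : List (List Int)) :
    List Int → Int × List (List Int)
  | [] => (sc, codes)
  | n :: ns =>
    let b := fmtBin bitSize.toNat n.toNat
    let code := parseBin b.reverse * 8 + 7
    let codes' := codes ++ [[code, bitSize + 3]]
    let sc' := sc + 1
    if numCodes ≤ sc' then (sc', codes') else innerA numCodes bitSize sc' codes' ns

-- the outer `while symbolCount < numCodes` loop of A.
-- fuel is only a totality guard: each iteration either increments groupIdx from 0
-- or grows symbolCount, so 2*(numCodes-1).toNat + 2 unfoldings always suffice
def loopA (numCodes : Int) : Nat → Int → Int → List (List Int) → List (List Int)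
  | 0, _, _, codes => codes
  | fuel + 1, sc, groupIdx, codes =>
    if sc < numCodes then
      let groupCt := F3 groupIdx
      let r := innerA numCodes groupIdx sc codes (PySem.List.pyRange 0 groupCt 1)
      if numCodes ≤ r.1 then r.2 else loopA numCodes fuel r.1 (groupIdx + 1) r.2
    else codes

def genFib3Codes (numCodes : Int) : List (List Int) :=
  loopA numCodes (2 * (numCodes - 1).toNat + 2) 1 0 [[0x07, 3]]

-- ===== PORT B =====

-- the inner bit-reversal loop of B: g iterations of rev = (rev<<1)|(m&1); m >>= 1
-- (m ≥ 0 throughout, so &1 and >>1 are % 2 and / 2)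
def revLoop (g : Nat) (rev m : Nat) : Nat :=
  match g with
  | 0 => rev
  | g + 1 => revLoop g (2 * rev + m % 2) (m / 2)

-- B's while loop, with the same fuel totality guard as loopA
def loopB (numCodes : Int) : Nat → Int → Int → Int → Int → List (List Int) → List (List Int)
  | 0, _, _, _, _, codes => codes
  | fuel + 1, x, y, z, g, codes =>
    if (codes.length : Int) < numCodes then
      let take := min z (numCodes - codes.length)
      let codes' := codes ++ (PySem.List.pyRange 0 take 1).map
        (fun n => [((revLoop g.toNat 0 n.toNat : Nat) : Int) * 8 + 7, g + 3])
      loopB numCodes fuel y z (x + y + z) (g + 1) codes'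
    else codes

def genFib3Codes_alt (numCodes : Int) : List (List Int) :=
  loopB numCodes (2 * (numCodes - 1).toNat + 2) 1 0 0 0 [[0x07, 3]]

-- ===== PRECONDITION & SPEC =====
def Spec_genFib3Codes (numCodes : Int) (out : List (List Int)) : Prop := out = genFib3Codes_alt numCodes
instance (numCodes : Int) (out : List (List Int)) : Decidable (Spec_genFib3Codes numCodes out) := by unfold Spec_genFib3Codes; infer_instance

-- ===== CLAIM (what is proved, stated in full; the proofs are below) =====
def Claim_equal_genFib3Codes : Prop := ∀ (numCodes : Int), Dom_genFib3Codes numCodes → Spec_genFib3Codes numCodes (genFib3Codes numCodes)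

-- ===== LEMMAS AND PROOFS =====

theorem F3_nonneg_fuel : ∀ (k : Nat) (n : Int), n.toNat ≤ k → 0 ≤ F3 n := by
  intro k
  induction k with
  | zero =>
    intro n hn
    rw [F3]
    have h0 : n ≤ 0 := by omega
    simp [h0]
  | succ k ih =>
    intro n hn
    rw [F3]
    split_ifs with h1 h2
    · omega
    · omega
    · have a1 := ih (n-1) (by omega)
      have a2 := ih (n-2) (by omega)
      have a3 := ih (n-3) (by omega)
      omega

theorem F3_nonneg (n : Int) : 0 ≤ F3 n := F3_nonneg_fuel n.toNat n le_rfl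

-- F3 satisfies the 3-step recurrence one step up (with F3 of negatives = 0)
theorem F3_rec (g : Int) (hg : 1 ≤ g) : F3 (g + 1) = F3 g + F3 (g - 1) + F3 (g - 2) := by
  conv_lhs => rw [F3]
  split_ifs with h1 h2
  · omega
  · omega
  · rw [show g + 1 - 1 = g from by ring, show g + 1 - 2 = g - 1 from by ring,
      show g + 1 - 3 = g - 2 from by ring]

theorem F3_le_pow_fuel : ∀ (k : Nat) (n : Int), n.toNat ≤ k → F3 n ≤ (2:Int) ^ n.toNat := by
  intro k
  induction k with
  | zero =>
    intro n hn
    rw [F3]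
    have h0 : n ≤ 0 := by omega
    simp [h0]
  | succ k ih =>
    intro n hn
    rw [F3]
    split_ifs with h1 h2
    · positivity
    · subst h2; norm_num
    · have a1 := ih (n-1) (by omega)
      have a2 := ih (n-2) (by omega)
      have a3 := ih (n-3) (by omega)
      have e1 : n.toNat = (n-1).toNat + 1 := by omega
      have hb : (2:Int) ^ (n-1).toNat + (2:Int) ^ (n-2).toNat + (2:Int) ^ (n-3).toNat
          ≤ (2:Int) ^ n.toNat := by
        by_cases h3 : n = 2
        · subst h3; decide
        · rw [show n.toNat = (n-3).toNat + 3 from by omega,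
            show (n-1).toNat = (n-3).toNat + 2 from by omega,
            show (n-2).toNat = (n-3).toNat + 1 from by omega,
            pow_add, pow_add, pow_add]
          have hp : (0:Int) ≤ 2 ^ (n-3).toNat := by positivity
          norm_num
          linarith
      linarith

theorem F3_le_pow (n : Int) : F3 n ≤ (2:Int) ^ n.toNat := F3_le_pow_fuel n.toNat n le_rfl

-- the LSB-first list of the low w binary digits of n, as characters
def lsbL (w : Nat) (n : Nat) : List Char :=
  match w with
  | 0 => []
  | w + 1 => (if n % 2 = 1 then '1' else '0') :: lsbL w (n / 2)

theorem lsbL_zero : ∀ w, lsbL w 0 = List.replicate w '0' := by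
  intro w
  induction w with
  | zero => rfl
  | succ w ih => simp [lsbL, ih, List.replicate_succ]

theorem binRec_reverse_pad : ∀ (w n : Nat), n < 2 ^ w →
    (List.replicate (w - (binRec n).length) '0' ++ binRec n).reverse = lsbL w n := by
  intro w
  induction w with
  | zero =>
    intro n h
    have : n = 0 := by omega
    subst this
    rw [binRec]
    simp [lsbL]
  | succ w ih =>
    intro n h
    by_cases h0 : n = 0
    · subst h0
      have hb0 : binRec 0 = [] := by rw [binRec]; simp
      rw [hb0]
      simp only [List.length_nil, Nat.sub_zero, List.append_nil, List.reverse_replicate]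
      rw [lsbL, Nat.zero_div, lsbL_zero, if_neg (by decide : ¬ (0:Nat) % 2 = 1),
        List.replicate_succ]
    · rw [binRec, if_neg h0]
      have hlt : n / 2 < 2 ^ w := by
        have := pow_succ 2 w
        omega
      have := ih (n / 2) hlt
      rw [List.length_append, List.length_singleton]
      have harith : w + 1 - ((binRec (n/2)).length + 1) = w - (binRec (n/2)).length := by omega
      rw [harith, ← List.append_assoc, List.reverse_append, this]
      simp [lsbL]

-- A's padded format string, reversed, is the LSB-first digit list (w ≥ 1; n < 2^w)
theorem fmt_reverse (w n : Nat) (hw : 1 ≤ w) (h : n < 2 ^ w) :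
    (fmtBin w n).reverse = lsbL w n := by
  by_cases h0 : n = 0
  · subst h0
    have hbs : binStr 0 = ['0'] := rfl
    rw [fmtBin, hbs, List.length_singleton]
    have : List.replicate (w - 1) '0' ++ ['0'] = List.replicate w '0' := by
      have h := List.replicate_succ' (n := w - 1) (a := '0')
      rw [← h, Nat.sub_add_cancel hw]
    rw [this, List.reverse_replicate, lsbL_zero]
  · rw [fmtBin, binStr, if_neg h0]
    exact binRec_reverse_pad w n h

theorem parse_lsb : ∀ (w rev m : Nat),
    (lsbL w m).foldl (fun (a : Int) c => 2 * a + (if c = '1' then 1 else 0)) (rev : Int)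
      = ((revLoop w rev m : Nat) : Int) := by
  intro w
  induction w with
  | zero => intro rev m; simp [lsbL, revLoop]
  | succ w ih =>
    intro rev m
    rw [lsbL, revLoop]
    have step := ih (2 * rev + m % 2) (m / 2)
    rcases Nat.mod_two_eq_zero_or_one m with h | h <;> rw [h] at step ⊢ <;>
      simpa using step

-- the per-code computation of A equals the per-code computation of B
theorem code_eq (w n : Nat) (hw : 1 ≤ w) (h : n < 2 ^ w) :
    parseBin (fmtBin w n).reverse = ((revLoop w 0 n : Nat) : Int) := by
  rw [parseBin, fmt_reverse w n hw h]
  exact_mod_cast parse_lsb w 0 n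

-- characterisation of A's inner loop: it appends codes for the first
-- min(len ns, numCodes - sc) values and advances symbolCount by that amount
theorem innerA_eq (N w : Int) : ∀ (ns : List Int) (sc : Int) (codes : List (List Int)),
    sc < N →
    innerA N w sc codes ns
      = (sc + min (ns.length : Int) (N - sc),
         codes ++ (ns.take (N - sc).toNat).map
           (fun n => [parseBin (fmtBin w.toNat n.toNat).reverse * 8 + 7, w + 3])) := by
  intro ns
  induction ns with
  | nil =>
    intro sc codes h
    simp only [innerA, List.length_nil, Int.natCast_zero, List.take_nil, List.map_nil,
      List.append_nil]
    rw [min_eq_left (by omega)]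
    simp
  | cons n ns ih =>
    intro sc codes h
    simp only [innerA]
    split_ifs with hb
    · have hN : N = sc + 1 := by omega
      subst hN
      have ht : (sc + 1 - sc).toNat = 1 := by omega
      rw [ht]
      simp only [List.take_succ_cons, List.take_zero, List.map_cons, List.map_nil,
        List.length_cons]
      rw [min_eq_right (by push_cast; omega)]
      simp
    · rw [ih (sc + 1) _ (by omega)]
      have ht : (N - sc).toNat = (N - (sc + 1)).toNat + 1 := by omega
      rw [ht]
      simp only [List.take_succ_cons, List.map_cons, List.length_cons, Prod.mk.injEq]
      refine ⟨by push_cast; omega, by simp⟩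

-- taking k elements of range(ct) is range(min(ct, k))
theorem take_pyRange (ct : Int) (k : Nat) (hct : 0 ≤ ct) :
    (PySem.List.pyRange 0 ct 1).take k = PySem.List.pyRange 0 (min ct (k : Int)) 1 := by
  rw [PySem.List.pyRange_one, PySem.List.pyRange_one, ← List.map_take, List.take_range,
    show min k (ct - 0).toNat = (min ct (k : Int) - 0).toNat from by omega]

-- once enough codes are stacked, loopB returns them whatever the remaining fuel
theorem loopB_stop (N : Int) (fuel : Nat) (x y z g : Int) (codes : List (List Int))
    (h : ¬ ((codes.length : Int) < N)) : loopB N fuel x y z g codes = codes := by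
  cases fuel with
  | zero => rfl
  | succ fuel => rw [loopB, if_neg h]

-- the joint loop invariant: symbolCount = len(codes) and the rolling triple
-- carries F3(g-1), F3(g), F3(g+1); induction on the (shared) fuel
theorem loops_eq : ∀ (fuel : Nat) (N sc g x y z : Int) (codes : List (List Int))
    (hg : 0 ≤ g)
    (hIy : y = F3 (g - 1)) (hIz : z = F3 g) (hIs : x + y + z = F3 (g + 1))
    (hsc : sc = (codes.length : Int)),
    loopA N fuel sc g codes = loopB N fuel x y z g codes := by
  intro fuel
  induction fuel with
  | zero => intro N sc g x y z codes _ _ _ _ _; rfl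
  | succ fuel ih =>
    intro N sc g x y z codes hg hIy hIz hIs hsc
    rw [loopA, loopB]
    dsimp only
    by_cases hlt : sc < N
    · rw [if_pos hlt, if_pos (show (codes.length : Int) < N from by omega)]
      have hF0 : 0 ≤ F3 g := F3_nonneg g
      have hlen : ((PySem.List.pyRange 0 (F3 g) 1).length : Int) = F3 g := by
        rw [PySem.List.length_pyRange_one]; omega
      rw [innerA_eq N g _ sc codes hlt, hlen]
      have htake : min z (N - (codes.length : Int)) = min (F3 g) (N - sc) := by
        rw [hIz, hsc]
      set t : Int := min (F3 g) (N - sc) with hts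
      have ht0 : 0 ≤ t := le_min hF0 (by omega)
      have httok : t ≤ F3 g := min_le_left _ _
      have hmap : ((PySem.List.pyRange 0 (F3 g) 1).take (N - sc).toNat).map
            (fun n => [parseBin (fmtBin g.toNat n.toNat).reverse * 8 + 7, g + 3])
          = (PySem.List.pyRange 0 (min z (N - (codes.length : Int))) 1).map
            (fun n => [((revLoop g.toNat 0 n.toNat : Nat) : Int) * 8 + 7, g + 3]) := by
        rw [take_pyRange (F3 g) (N - sc).toNat hF0, htake]
        have : min (F3 g) (((N - sc).toNat : Int)) = t := by
          rw [hts]; omega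
        rw [this]
        apply List.map_congr_left
        intro a ha
        rw [PySem.List.mem_pyRange_one] at ha
        have hg1 : 1 ≤ g := by
          by_contra hgc
          have hgle : g ≤ 0 := by omega
          have : F3 g = 0 := by rw [F3]; simp [hgle]
          omega
        have hanat : a.toNat < 2 ^ g.toNat := by
          have h1 : F3 g ≤ (2:Int) ^ g.toNat := F3_le_pow g
          have h2 : a < F3 g := by omega
          have : ((a.toNat : Int)) < (2:Int) ^ g.toNat := by omega
          exact_mod_cast this
        rw [code_eq g.toNat a.toNat (by omega) hanat]
      rw [hmap]
      dsimp only
      set codes' := codes ++ (PySem.List.pyRange 0 (min z (N - (codes.length : Int))) 1).map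
          (fun n => [((revLoop g.toNat 0 n.toNat : Nat) : Int) * 8 + 7, g + 3]) with hcs
      have hlen' : (codes'.length : Int) = sc + t := by
        rw [hcs]
        simp only [List.length_append, List.length_map, PySem.List.length_pyRange_one, htake]
        push_cast
        omega
      by_cases hdone : N ≤ sc + t
      · rw [if_pos hdone, loopB_stop N fuel _ _ _ _ _ (by omega)]
      · rw [if_neg hdone]
        refine ih N (sc + t) (g + 1) y z (x + y + z) codes' (by omega) ?_ ?_ ?_ (by omega)
        · rw [show g + 1 - 1 = g from by ring, hIz]
        · exact hIs
        · rw [show g + 1 + 1 = (g + 1) + 1 from rfl, F3_rec (g + 1) (by omega),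
            show g + 1 - 1 = g from by ring, show g + 1 - 2 = g - 1 from by ring,
            ← hIy, ← hIz, ← hIs]
          ring
    · rw [if_neg hlt, if_neg (by omega)]

-- ===== VERDICT (by name: the statement is the Claim_ definition above) =====
theorem genFib3Codes_spec : Claim_equal_genFib3Codes := by
  intro numCodes _
  unfold Spec_genFib3Codes genFib3Codes genFib3Codes_alt
  apply loops_eq
  · omega
  · rw [F3]; norm_num
  · rw [F3]; norm_num
  · rw [F3]; norm_num
  · simp
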